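-- pv_equiv track=rewrite | github.com/Garenpku/Coreference-Resolution | seq2seq/util/dataset_util.py | add_dependency
-- ===== SOURCE A (Python) =====
-- def add_dependency(state_corpus, dep_corpus):
--     punctuation = [',', '.', '-', '?', '!', "'", '"', 'ROOT']
--     result = []
--     for i in range(len(state_corpus)):
--         result_dialog = []
--         for j in range(len(state_corpus[i])):
--             dict_utterance = {}
--             for word in state_corpus[i][j]:
--                 related_dep = [dep[0] for dep in dep_corpus[i][j] if dep[1] == word and dep[0] not in punctuation]
--                 dict_utterance[word] = related_dep
--             result_dialog.append(dict_utterance)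
--         result.append(result_dialog)
--     return result
-- ===== SOURCE B (Python) =====
-- def add_dependency(state_corpus, dep_corpus):
--     punctuation = {',', '.', '-', '?', '!', "'", '"', 'ROOT'}
--     result = []
--     for i, dialog in enumerate(state_corpus):
--         result_dialog = []
--         for j, words in enumerate(dialog):
--             if words:
--                 groups = {}
--                 for head, tail in dep_corpus[i][j]:
--                     if head not in punctuation:
--                         groups.setdefault(tail, []).append(head)
--                 result_dialog.append({w: list(groups.get(w, [])) for w in words})
--             else:
--                 result_dialog.append({})
--         result.append(result_dialog)
--     return result
-- ===== Notes on version B (the rewrite author's own statement) =====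
-- stated objective: alternative
-- what changed: Instead of rescanning the whole dependency list for every word, B builds one dict per utterance grouping dependency heads by their tail in a single pass and then answers each word by a dict lookup (O(W+D) per utterance instead of O(W*D)); intended as faster, measured at ~1.4-1.5x on the generated inputs (not consistently above the 1.5x bar).
import Mathlib
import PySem

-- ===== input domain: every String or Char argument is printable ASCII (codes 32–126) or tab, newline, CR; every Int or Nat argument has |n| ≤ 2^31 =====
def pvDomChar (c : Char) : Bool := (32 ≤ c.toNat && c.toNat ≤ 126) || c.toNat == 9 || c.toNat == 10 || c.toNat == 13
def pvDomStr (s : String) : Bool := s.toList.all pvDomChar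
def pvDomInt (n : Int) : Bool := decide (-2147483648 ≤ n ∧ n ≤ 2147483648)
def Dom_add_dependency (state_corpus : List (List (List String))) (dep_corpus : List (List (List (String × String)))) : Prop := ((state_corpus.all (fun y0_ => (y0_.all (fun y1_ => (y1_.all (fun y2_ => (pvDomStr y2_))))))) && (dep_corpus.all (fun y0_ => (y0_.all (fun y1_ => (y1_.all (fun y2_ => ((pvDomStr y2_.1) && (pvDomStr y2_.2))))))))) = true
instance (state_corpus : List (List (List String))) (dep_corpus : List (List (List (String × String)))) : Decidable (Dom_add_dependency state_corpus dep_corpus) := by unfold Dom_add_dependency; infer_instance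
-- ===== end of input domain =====

-- B replaces A's per-word scan of the whole dependency list by one grouping dict built in a
-- single pass per utterance, then a lookup per word (O(W+D) vs O(W*D) per utterance; measured
-- ~1.4-1.5x here, so claimed as an alternative, not as confirmed faster).

-- ===== PORT A =====
-- the punctuation literal of A
def punctA : List String := [",", ".", "-", "?", "!", "'", "\"", "ROOT"]

-- body of A's word loop: dict_utterance for one utterance (returned as its items list)
def addA_utt (deps : List (String × String)) (words : List String) : List (String × List String) :=
  (words.foldl (fun d word =>
      let related_dep := (deps.filter (fun dep => dep.2 == word && !punctA.contains dep.1)).map (·.1)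
      d.insert word related_dep)
    (PySem.Dict.empty : PySem.Dict String (List String))).items

-- body of A's j loop: result_dialog (dep_corpus[i][j] is in range under Pre_add_dependency)
def addA_dialog (dep_corpus : List (List (List (String × String)))) (i : Int) (dialog : List (List String)) : List (List (String × List String)) :=
  (PySem.List.pyRange 0 dialog.length 1).foldl (fun rd j =>
    rd ++ [addA_utt (PySem.List.pyGetD (PySem.List.pyGetD dep_corpus i []) j []) (PySem.List.pyGetD dialog j [])]) []

def add_dependency (state_corpus : List (List (List String))) (dep_corpus : List (List (List (String × String)))) : List (List (List (String × List String))) :=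
  (PySem.List.pyRange 0 state_corpus.length 1).foldl (fun result i =>
    result ++ [addA_dialog dep_corpus i (PySem.List.pyGetD state_corpus i [])]) []

-- ===== PORT B =====
-- the punctuation set of B
def punctB : PySem.Set String := PySem.Set.ofList [",", ".", "-", "?", "!", "'", "\"", "ROOT"]

-- B's grouping pass: groups.setdefault(tail, []).append(head) for the kept deps
def addB_groups (deps : List (String × String)) : PySem.Dict String (List String) :=
  deps.foldl (fun g dep =>
    if !punctB.contains dep.1 then g.modify dep.2 [] (· ++ [dep.1]) else g)
    PySem.Dict.empty

-- B's dict comprehension {w: groups.get(w, []) for w in words}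
def addB_utt (deps : List (String × String)) (words : List String) : List (String × List String) :=
  let groups := addB_groups deps
  (words.foldl (fun d w => d.insert w (groups.getD w [])) (PySem.Dict.empty : PySem.Dict String (List String))).items

def add_dependency_alt (state_corpus : List (List (List String))) (dep_corpus : List (List (List (String × String)))) : List (List (List (String × List String))) :=
  (PySem.List.enumerate state_corpus 0).map (fun p =>
    (PySem.List.enumerate p.2 0).map (fun q =>
      if q.2.isEmpty then ([] : List (String × List String))
      else addB_utt (PySem.List.pyGetD (PySem.List.pyGetD dep_corpus p.1 []) q.1 []) q.2))

-- ===== PRECONDITION & SPEC =====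
-- Pre_ excludes exactly the inputs on which A raises IndexError: a non-empty word list
-- state_corpus[i][j] for which dep_corpus[i][j] does not exist.
def Pre_add_dependency (state_corpus : List (List (List String))) (dep_corpus : List (List (List (String × String)))) : Prop :=
  ∀ i : Fin state_corpus.length, ∀ j : Fin (state_corpus.get i).length,
    (state_corpus.get i).get j ≠ [] →
      i.val < dep_corpus.length ∧ j.val < (dep_corpus.getD i.val []).length
instance (state_corpus : List (List (List String))) (dep_corpus : List (List (List (String × String)))) : Decidable (Pre_add_dependency state_corpus dep_corpus) := by unfold Pre_add_dependency; infer_instance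

def pvWitness_add_dependency : List (List (List String)) × (List (List (List (String × String)))) :=
  ([[["he", "ran"], []]], [[[("ran", "he"), (",", "ran")], []]])

def Spec_add_dependency (state_corpus : List (List (List String))) (dep_corpus : List (List (List (String × String)))) (out : List (List (List (String × List String)))) : Prop := out = add_dependency_alt state_corpus dep_corpus
instance (state_corpus : List (List (List String))) (dep_corpus : List (List (List (String × String)))) (out : List (List (List (String × List String)))) : Decidable (Spec_add_dependency state_corpus dep_corpus out) := by unfold Spec_add_dependency; infer_instance

-- ===== CLAIM (what is proved, stated in full; the proofs are below) =====
def Claim_equal_add_dependency : Prop := ∀ (state_corpus : List (List (List String))) (dep_corpus : List (List (List (String × String)))), Dom_add_dependency state_corpus dep_corpus → Pre_add_dependency state_corpus dep_corpus → Spec_add_dependency state_corpus dep_corpus (add_dependency state_corpus dep_corpus)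

-- ===== LEMMAS AND PROOFS =====

-- the two punctuation containers test the same membership
lemma punctB_contains (s : String) : punctB.contains s = punctA.contains s := by
  have h : punctB = punctA := by decide
  simp [h]

-- looking w up in B's grouping dict returns the heads of the kept deps whose tail is w
lemma groups_getD_A (w : String) (deps : List (String × String)) :
    ∀ g : PySem.Dict String (List String),
      (deps.foldl (fun g dep =>
        if !punctA.contains dep.1 then g.modify dep.2 [] (· ++ [dep.1]) else g) g).getD w []
      = g.getD w [] ++ (deps.filter (fun dep => dep.2 == w && !punctA.contains dep.1)).map (·.1) := by
  induction deps with
  | nil => intro g; simp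
  | cons p rest ih =>
    intro g
    by_cases hq : punctA.contains p.1
    · simp only [List.foldl_cons, hq, Bool.not_true, Bool.false_eq_true,
        if_false, List.filter_cons, Bool.and_false]
      exact ih g
    · simp only [List.foldl_cons, hq, Bool.not_false, if_true,
        List.filter_cons, Bool.and_true]
      rw [ih, PySem.Dict.getD_modify]
      by_cases hw : w = p.2
      · simp [hw, List.append_assoc]
      · have hne : p.2 ≠ w := fun h => hw h.symm
        simp [hw, hne]

lemma groups_getD (w : String) (deps : List (String × String)) (g : PySem.Dict String (List String)) :
      (deps.foldl (fun g dep =>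
        if !punctB.contains dep.1 then g.modify dep.2 [] (· ++ [dep.1]) else g) g).getD w []
      = g.getD w [] ++ (deps.filter (fun dep => dep.2 == w && !punctA.contains dep.1)).map (·.1) := by
  have hfun : (fun (g : PySem.Dict String (List String)) (dep : String × String) =>
        if !punctB.contains dep.1 then g.modify dep.2 [] (· ++ [dep.1]) else g)
      = (fun (g : PySem.Dict String (List String)) (dep : String × String) =>
        if !punctA.contains dep.1 then g.modify dep.2 [] (· ++ [dep.1]) else g) := by
    funext g dep
    rw [punctB_contains]
  rw [hfun, groups_getD_A]

-- per-utterance equality of A's dict and B's dict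
lemma utt_eq (deps : List (String × String)) (words : List String) :
    addA_utt deps words
      = if words.isEmpty then ([] : List (String × List String)) else addB_utt deps words := by
  cases words with
  | nil => simp [addA_utt, PySem.Dict.empty]
  | cons w ws =>
    simp only [List.isEmpty_cons, Bool.false_eq_true, if_false]
    unfold addA_utt addB_utt addB_groups
    congr 1
    have hfun : (fun (d : PySem.Dict String (List String)) (word : String) =>
        d.insert word ((deps.filter (fun dep => dep.2 == word && !punctA.contains dep.1)).map (·.1)))
      = (fun (d : PySem.Dict String (List String)) (word : String) =>
        d.insert word ((deps.foldl (fun g dep =>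
          if !punctB.contains dep.1 then g.modify dep.2 [] (· ++ [dep.1]) else g)
          PySem.Dict.empty).getD word [])) := by
      funext d word
      rw [groups_getD word deps PySem.Dict.empty]
      simp [PySem.Dict.empty, PySem.Dict.getD, PySem.Dict.get?]
    rw [hfun]

-- per-dialog equality
lemma dialog_eq (dep_corpus : List (List (List (String × String)))) (i : Int) (dialog : List (List String)) :
    addA_dialog dep_corpus i dialog
      = (PySem.List.enumerate dialog 0).map (fun q =>
          if q.2.isEmpty then ([] : List (String × List String))
          else addB_utt (PySem.List.pyGetD (PySem.List.pyGetD dep_corpus i []) q.1 []) q.2) := by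
  unfold addA_dialog
  rw [PySem.List.foldl_append_singleton_eq_map,
    PySem.List.enumerate_eq_map_pyRange (d := ([] : List String)), List.map_map]
  apply List.map_congr_left
  intro j _
  simp only [Function.comp]
  rw [utt_eq]

theorem add_dependency_spec : Claim_equal_add_dependency := by
  intro state_corpus dep_corpus _ _
  unfold Spec_add_dependency add_dependency add_dependency_alt
  rw [PySem.List.foldl_append_singleton_eq_map,
    PySem.List.enumerate_eq_map_pyRange (d := ([] : List (List String))), List.map_map]
  apply List.map_congr_left
  intro i _
  simp only [Function.comp]
  rw [dialog_eq]
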